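-- pv_equiv track=rewrite | github.com/pypi-data/pypi-mirror-353 | packages/visceral/visceral-0.1.2.tar.gz/visceral-0.1.2/src/visceral/Functions/maxdiff.py | generate_simple_rotation
-- ===== SOURCE A (Python) =====
-- def generate_simple_rotation(total_options: int, features_per_set: int, total_sets: int) -> list:
--     """
--     Generates a simple rotation design as fallback.
--     """
--     all_sets = []
--     options = list(range(1, total_options + 1))
--
--     for set_num in range(total_sets):
--         start_idx = set_num % total_options
--         set_features = []
--         for i in range(features_per_set):
--             idx = (start_idx + i) % total_options
--             set_features.append(f"{options[idx]:02d}")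
--         all_sets.append(set_features)
--     return all_sets
-- ===== SOURCE B (Python) =====
-- def generate_simple_rotation(total_options: int, features_per_set: int, total_sets: int) -> list:
--     labels = [f"{v:02d}" for v in range(1, total_options + 1)]
--
--     def window(start):
--         reps = labels * -((start + features_per_set) // -total_options)
--         return reps[start:start + features_per_set]
--
--     return [window(set_num % total_options) for set_num in range(total_sets)]
-- ===== Notes on version B (the rewrite author's own statement) =====
-- stated objective: faster
-- what changed: B formats the labels once and builds each set as a slice of a repeated label list, instead of A's per-element inner loop that re-formats options[(start+i) % total_options] for every element of every set.
import Mathlib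
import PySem

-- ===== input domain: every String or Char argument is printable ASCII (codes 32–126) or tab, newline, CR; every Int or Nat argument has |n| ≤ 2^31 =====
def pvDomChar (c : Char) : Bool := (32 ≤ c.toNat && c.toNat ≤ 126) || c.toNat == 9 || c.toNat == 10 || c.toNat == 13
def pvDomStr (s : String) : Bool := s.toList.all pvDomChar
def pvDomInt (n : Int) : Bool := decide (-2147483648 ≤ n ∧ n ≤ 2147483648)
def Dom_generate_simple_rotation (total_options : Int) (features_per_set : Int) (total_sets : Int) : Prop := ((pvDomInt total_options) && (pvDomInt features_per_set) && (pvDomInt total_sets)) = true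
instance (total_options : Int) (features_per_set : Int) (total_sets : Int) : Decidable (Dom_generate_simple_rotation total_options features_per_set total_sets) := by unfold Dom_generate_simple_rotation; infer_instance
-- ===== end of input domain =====

-- B precomputes the formatted labels once and builds each set by slicing a repeated label list,
-- instead of A's per-element modular-indexing inner loop; same values on all inputs where A returns.

-- ===== PORT A =====
-- f"{v:02d}" for an int v (zero-pad to width 2) = str(v).zfill(2); exact via PySem.Str.zfill
def generate_simple_rotation (total_options : Int) (features_per_set : Int) (total_sets : Int) : List (List String) :=
  let options := PySem.List.pyRange 1 (total_options + 1) 1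
  (PySem.List.pyRange 0 total_sets 1).foldl
    (fun all_sets set_num =>
      let start_idx := PySem.Int.mod set_num total_options
      let set_features := (PySem.List.pyRange 0 features_per_set 1).foldl
        (fun sf i =>
          let idx := PySem.Int.mod (start_idx + i) total_options
          sf ++ [PySem.Str.zfill (PySem.Int.toStr (PySem.List.pyGetD options idx 0)) 2])
        []
      all_sets ++ [set_features])
    []

-- ===== PORT B =====
def pvWindow (labels : List String) (total_options : Int) (features_per_set : Int) (start : Int) : List String :=
  let reps := PySem.List.pyRepeat labels (-(PySem.Int.floordiv (start + features_per_set) (-total_options)))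
  PySem.List.slice reps (some start) (some (start + features_per_set))

def generate_simple_rotation_alt (total_options : Int) (features_per_set : Int) (total_sets : Int) : List (List String) :=
  let labels := (PySem.List.pyRange 1 (total_options + 1) 1).map
    (fun v => PySem.Str.zfill (PySem.Int.toStr v) 2)
  (PySem.List.pyRange 0 total_sets 1).map
    (fun set_num => pvWindow labels total_options features_per_set (PySem.Int.mod set_num total_options))

-- ===== PRECONDITION & SPEC =====
-- Pre_ excludes exactly the inputs where A raises: ZeroDivisionError (total_options = 0 with
-- total_sets > 0) and IndexError on options[idx] (total_options < 0 with features_per_set > 0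
-- and total_sets > 0); on every other input A returns normally.
def Pre_generate_simple_rotation (total_options : Int) (features_per_set : Int) (total_sets : Int) : Prop :=
  total_sets ≤ 0 ∨ 0 < total_options ∨ (total_options < 0 ∧ features_per_set ≤ 0)
instance (total_options : Int) (features_per_set : Int) (total_sets : Int) : Decidable (Pre_generate_simple_rotation total_options features_per_set total_sets) := by unfold Pre_generate_simple_rotation; infer_instance

def pvWitness_generate_simple_rotation : Int × Int × Int := (3, 5, 4)

def Spec_generate_simple_rotation (total_options : Int) (features_per_set : Int) (total_sets : Int) (out : List (List String)) : Prop := out = generate_simple_rotation_alt total_options features_per_set total_sets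
instance (total_options : Int) (features_per_set : Int) (total_sets : Int) (out : List (List String)) : Decidable (Spec_generate_simple_rotation total_options features_per_set total_sets out) := by unfold Spec_generate_simple_rotation; infer_instance

-- ===== CLAIM (what is proved, stated in full; the proofs are below) =====
def Claim_equal_generate_simple_rotation : Prop := ∀ (total_options : Int) (features_per_set : Int) (total_sets : Int), Dom_generate_simple_rotation total_options features_per_set total_sets → Pre_generate_simple_rotation total_options features_per_set total_sets → Spec_generate_simple_rotation total_options features_per_set total_sets (generate_simple_rotation total_options features_per_set total_sets)

-- ===== LEMMAS AND PROOFS =====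

-- slicing the empty list is empty
theorem pv_slice_nil (a b : Option Int) : PySem.List.slice ([] : List String) a b = [] := by
  simp [PySem.List.slice]

-- indexing into a k-fold repetition is cyclic indexing
theorem pv_getElem?_flatten_replicate {α : Type} (l : List α) (k i : Nat)
    (hi : i < k * l.length) :
    (List.flatten (List.replicate k l))[i]? = l[i % l.length]? := by
  induction k generalizing i with
  | zero => simp at hi
  | succ k ih =>
    have hn : 0 < l.length := by
      rcases Nat.eq_zero_or_pos l.length with h | h
      · rw [h, Nat.mul_zero] at hi; omega
      · exact h
    rw [List.replicate_succ, List.flatten_cons]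
    by_cases h : i < l.length
    · rw [List.getElem?_append_left h, Nat.mod_eq_of_lt h]
    · push Not at h
      rw [List.getElem?_append_right h]
      have hmul : (k + 1) * l.length = k * l.length + l.length := by ring
      have : i - l.length < k * l.length := by omega
      rw [ih _ this, Nat.mod_eq_sub_mod h]

-- a window row of B equals A's inner loop row, for 0 ≤ start < total_options
theorem pv_row_eq (total_options features_per_set start : Int)
    (hto : 0 < total_options) (hs0 : 0 ≤ start) (hs1 : start < total_options) :
    (PySem.List.pyRange 0 features_per_set 1).map
      (fun i => PySem.Str.zfill (PySem.Int.toStr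
        (PySem.List.pyGetD (PySem.List.pyRange 1 (total_options + 1) 1)
          (PySem.Int.mod (start + i) total_options) 0)) 2)
    = pvWindow ((PySem.List.pyRange 1 (total_options + 1) 1).map
        (fun v => PySem.Str.zfill (PySem.Int.toStr v) 2))
        total_options features_per_set start := by
  set k : Int := -(PySem.Int.floordiv (start + features_per_set) (-total_options)) with hk
  have hbr : k * total_options - total_options < start + features_per_set ∧
      start + features_per_set ≤ k * total_options := by
    have h1 := PySem.Int.floordiv_mul_add_mod (start + features_per_set) (-total_options)
    have h2 := PySem.Int.mod_neg_bounds (start + features_per_set) (b := -total_options) (by omega)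
    constructor <;> nlinarith [h1, h2.1, h2.2]
  unfold pvWindow
  by_cases hneg : start + features_per_set < 0
  · -- the window is empty: fp < 0 so A's inner range is empty, and k ≤ 0 so reps is empty
    have hk0 : k ≤ 0 := by nlinarith [hbr.1]
    rw [PySem.List.pyRange_one_eq_nil (by omega : features_per_set ≤ 0), List.map_nil]
    rw [PySem.List.pyRepeat, Int.toNat_of_nonpos hk0, List.replicate_zero, List.flatten_nil,
      pv_slice_nil]
  · push Not at hneg
    rw [PySem.List.slice_toNat _ hs0 hneg]
    apply List.ext_getElem?
    intro j
    have hlen : ((PySem.List.pyRange 1 (total_options + 1) 1).map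
        (fun v => PySem.Str.zfill (PySem.Int.toStr v) 2)).length = total_options.toNat := by
      rw [List.length_map, PySem.List.length_pyRange_one]; congr 1; omega
    by_cases hj : (j : Int) < features_per_set
    · -- in range: both sides are some (zfill (toStr (1 + (start+j) % total_options)) 2)
      have hfp : 0 < features_per_set := by omega
      have hkpos : 0 < k := by nlinarith [hbr.2]
      set m : Nat := (start.toNat + j) % total_options.toNat with hm
      have hton : 0 < total_options.toNat := by omega
      have hmlt : m < total_options.toNat := Nat.mod_lt _ hton
      -- LHS
      rw [List.getElem?_map, PySem.List.getElem?_pyRange_one,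
        if_pos (by omega : j < (features_per_set - 0).toNat), Option.map_some]
      -- RHS
      rw [List.getElem?_take, if_pos (by omega : j < (start + features_per_set).toNat - start.toNat),
        List.getElem?_drop, PySem.List.pyRepeat]
      have hib : start.toNat + j < k.toNat *
          ((PySem.List.pyRange 1 (total_options + 1) 1).map
            (fun v => PySem.Str.zfill (PySem.Int.toStr v) 2)).length := by
        rw [hlen]
        have h1 : start + (j : Int) < k * total_options := by linarith [hbr.2, hj]
        zify [Int.toNat_of_nonneg hs0, Int.toNat_of_nonneg hkpos.le, Int.toNat_of_nonneg hto.le]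
        linarith [h1]
      rw [pv_getElem?_flatten_replicate _ _ _ hib, hlen, ← hm]
      rw [List.getElem?_map, PySem.List.getElem?_pyRange_one,
        if_pos (by omega : m < (total_options + 1 - 1).toNat), Option.map_some]
      -- equal values
      have hmodcast : PySem.Int.mod (start + (0 + (j : Int))) total_options = ((m : Nat) : Int) := by
        have h1 : start + (0 + (j : Int)) = ((start.toNat + j : Nat) : Int) := by push_cast; omega
        have h2 : total_options = ((total_options.toNat : Nat) : Int) := by omega
        rw [h1, h2, PySem.Int.mod_natCast]
      have hval : PySem.List.pyGetD (PySem.List.pyRange 1 (total_options + 1) 1)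
          (PySem.Int.mod (start + (0 + (j : Int))) total_options) 0 = 1 + (m : Int) := by
        rw [hmodcast, PySem.List.pyGetD_of_nonneg _ _ (by positivity), Int.toNat_natCast]
        have hmlt' : m < (PySem.List.pyRange 1 (total_options + 1) 1).length := by
          rw [PySem.List.length_pyRange_one]; omega
        rw [List.getD_eq_getElem _ _ hmlt', PySem.List.getElem_pyRange_one]
      rw [hval]
    · -- out of range: both none
      push Not at hj
      rw [List.getElem?_map, PySem.List.getElem?_pyRange_one, if_neg (by omega),
        List.getElem?_take, if_neg (by omega), Option.map_none]

-- ===== VERDICT (by name: the statement is the Claim_ definition above) =====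
theorem generate_simple_rotation_spec : Claim_equal_generate_simple_rotation := by
  intro tn fp ts _ hpre
  unfold Spec_generate_simple_rotation generate_simple_rotation generate_simple_rotation_alt
  simp only []
  rw [PySem.List.foldl_append_singleton_eq_map
    (f := fun set_num => (PySem.List.pyRange 0 fp 1).foldl
      (fun sf i => sf ++ [PySem.Str.zfill (PySem.Int.toStr
        (PySem.List.pyGetD (PySem.List.pyRange 1 (tn + 1) 1)
          (PySem.Int.mod (PySem.Int.mod set_num tn + i) tn) 0)) 2]) [])]
  rw [List.nil_append]
  apply List.map_congr_left
  intro s hs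
  rw [PySem.List.foldl_append_singleton_eq_map
    (f := fun i => PySem.Str.zfill (PySem.Int.toStr
      (PySem.List.pyGetD (PySem.List.pyRange 1 (tn + 1) 1)
        (PySem.Int.mod (PySem.Int.mod s tn + i) tn) 0)) 2)]
  rw [List.nil_append]
  rcases hpre with h | h | ⟨h1, h2⟩
  · exact absurd (PySem.List.mem_pyRange_one.mp hs) (by omega)
  · exact pv_row_eq tn fp (PySem.Int.mod s tn) h (PySem.Int.mod_nonneg s h) (PySem.Int.mod_lt s h)
  · -- total_options < 0 and features_per_set ≤ 0: both rows are empty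
    rw [PySem.List.pyRange_one_eq_nil (by omega : fp ≤ 0),
      PySem.List.pyRange_one_eq_nil (by omega : tn + 1 ≤ 1), List.map_nil, List.map_nil]
    unfold pvWindow
    rw [PySem.List.pyRepeat, List.flatten_replicate_nil, pv_slice_nil]
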